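-- pv_equiv track=rewrite | github.com/thu-nics/DiTFastAttn | modules/fast_attn_processor.py | compute_need_compute_residual
-- ===== SOURCE A (Python) =====
-- def compute_need_compute_residual(steps_method):
--     need_compute_residual = []
--     for i, method in enumerate(steps_method):
--         need = False
--         if "full_attn" in method:
--             for j in range(i + 1, len(steps_method)):
--                 if "residual_window_attn" in steps_method[j] and "without_residual" not in steps_method[j]:
--                     # If encountered a step that conduct WA-RS,
--                     # this step needs the residual computation
--                     need = True
--                 if "full_attn" in steps_method[j]:
--                     # If encountered another step using the `full-attn` strategy,
--                     # this step doesn't need the residual computation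
--                     break
--         need_compute_residual.append(need)
--     return need_compute_residual
-- ===== SOURCE B (Python) =====
-- def compute_need_compute_residual(steps_method):
--     # single backward pass: `seen` = a WA-RS step occurs after here, before/at the next full_attn step
--     res = []
--     seen = False
--     for method in reversed(steps_method):
--         is_full = "full_attn" in method
--         res.append(is_full and seen)
--         seen = ("residual_window_attn" in method and "without_residual" not in method) or (not is_full and seen)
--     res.reverse()
--     return res
-- ===== Notes on version B (the rewrite author's own statement) =====
-- stated objective: alternative
-- what changed: Replaced the per-step forward rescan until the next full_attn by a single backward pass that maintains one 'WA-RS seen before the next full_attn' flag, reset at each full_attn step.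
import Mathlib
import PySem

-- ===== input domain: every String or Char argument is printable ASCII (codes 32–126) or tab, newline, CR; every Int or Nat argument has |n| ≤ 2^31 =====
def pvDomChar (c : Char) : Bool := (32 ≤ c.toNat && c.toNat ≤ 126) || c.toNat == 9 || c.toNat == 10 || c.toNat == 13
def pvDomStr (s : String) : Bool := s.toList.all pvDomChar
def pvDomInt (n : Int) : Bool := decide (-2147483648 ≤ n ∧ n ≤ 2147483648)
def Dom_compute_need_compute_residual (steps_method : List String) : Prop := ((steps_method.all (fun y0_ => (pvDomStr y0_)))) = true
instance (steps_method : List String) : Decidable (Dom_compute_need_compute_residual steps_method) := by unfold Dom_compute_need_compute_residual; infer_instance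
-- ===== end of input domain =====

-- ===== PORT A =====
-- step predicates shared by both ports (direct ports of the Python substring tests)
def pvIsFull (m : String) : Bool := PySem.Str.isIn "full_attn" m
def pvIsWars (m : String) : Bool :=
  PySem.Str.isIn "residual_window_attn" m && !(PySem.Str.isIn "without_residual" m)

-- inner loop of A: scan the steps after i, set need on a WA-RS step, break at a full_attn step
def pvInnerA : List String → Bool → Bool
  | [], need => need
  | s :: rest, need =>
      let need := if pvIsWars s then true else need
      if pvIsFull s then need else pvInnerA rest need

def compute_need_compute_residual : List String → List Bool
  | [] => []
  | m :: rest =>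
      (if pvIsFull m then pvInnerA rest false else false) :: compute_need_compute_residual rest

-- ===== PORT B =====
-- single backward pass over reversed(steps_method) with a 'seen' flag, result reversed at the end
def compute_need_compute_residual_alt (steps_method : List String) : List Bool :=
  let p := steps_method.reverse.foldl
    (fun (acc : Bool × List Bool) m =>
      let isFull := pvIsFull m
      (pvIsWars m || (!isFull && acc.1), acc.2 ++ [isFull && acc.1]))
    (false, [])
  p.2.reverse

-- ===== PRECONDITION & SPEC =====
def Spec_compute_need_compute_residual (steps_method : List String) (out : List Bool) : Prop := out = compute_need_compute_residual_alt steps_method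
instance (steps_method : List String) (out : List Bool) : Decidable (Spec_compute_need_compute_residual steps_method out) := by unfold Spec_compute_need_compute_residual; infer_instance

-- ===== CLAIM (what is proved, stated in full; the proofs are below) =====
def Claim_equal_compute_need_compute_residual : Prop := ∀ (steps_method : List String), Dom_compute_need_compute_residual steps_method → Spec_compute_need_compute_residual steps_method (compute_need_compute_residual steps_method)

-- ===== LEMMAS AND PROOFS =====

-- 'a WA-RS step occurs after here before/at the next full_attn step', i.e. the value of A's inner scan
def pvSeen : List String → Bool
  | [] => false
  | m :: rest => pvIsWars m || (!pvIsFull m && pvSeen rest)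

lemma pvInnerA_acc (l : List String) (need : Bool) :
    pvInnerA l need = (need || pvSeen l) := by
  induction l generalizing need with
  | nil => simp [pvInnerA, pvSeen]
  | cons m rest ih =>
      simp only [pvInnerA, pvSeen]
      cases hw : pvIsWars m <;> cases hf : pvIsFull m <;>
        simp [ih, Bool.or_comm]

def pvStepB (acc : Bool × List Bool) (m : String) : Bool × List Bool :=
  (pvIsWars m || (!pvIsFull m && acc.1), acc.2 ++ [pvIsFull m && acc.1])

lemma pvFoldB (l : List String) :
    l.reverse.foldl pvStepB (false, []) =
      (pvSeen l, (compute_need_compute_residual l).reverse) := by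
  induction l with
  | nil => simp [pvSeen, compute_need_compute_residual]
  | cons m rest ih =>
      simp only [List.reverse_cons, List.foldl_append, ih, List.foldl_cons, List.foldl_nil]
      simp [pvStepB, pvSeen, compute_need_compute_residual, pvInnerA_acc]

-- ===== VERDICT (by name: the statement is the Claim_ definition above) =====
theorem compute_need_compute_residual_spec : Claim_equal_compute_need_compute_residual := by
  intro steps _
  unfold Spec_compute_need_compute_residual compute_need_compute_residual_alt
  have h : steps.reverse.foldl
      (fun (acc : Bool × List Bool) m =>
        let isFull := pvIsFull m
        (pvIsWars m || (!isFull && acc.1), acc.2 ++ [isFull && acc.1]))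
      (false, []) = steps.reverse.foldl pvStepB (false, []) := rfl
  simp only [h, pvFoldB, List.reverse_reverse]
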